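-- pv_equiv track=rewrite | github.com/ro-oliveira95/interactive-reactive-led-board | python/virtualLed.py | map8x32to1x256
-- ===== SOURCE A (Python) =====
-- def map8x32to1x256(data):
--   output = []
--   for j in range(len(data[0])-1, -1, -1):
--     if j%2==0:
--       rg = range(len(data))
--     else:
--       rg = range(len(data)-1, -1, -1)
--
--     for i in rg:
--       output.append(data[i][j])
--
--   return output
-- ===== SOURCE B (Python) =====
-- def map8x32to1x256(data):
--     # Closed-form index mapping: output position k comes from column j = m-1 - k//n
--     # and row k%n (flipped in odd columns); one flat pass, no nested loops.
--     n = len(data)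
--     m = len(data[0])
--     def src(k):
--         q, r = divmod(k, n)
--         j = m - 1 - q
--         i = r if j % 2 == 0 else n - 1 - r
--         return data[i][j]
--     return [src(k) for k in range(n * m)]
-- ===== Notes on version B (the rewrite author's own statement) =====
-- stated objective: alternative
-- what changed: B replaces A's nested serpentine scan (outer column loop, inner row loop with a parity-chosen direction) by a closed-form index map: one flat pass over output positions k in range(n*m), computing the source cell (i,j) from k by divmod arithmetic.
import Mathlib
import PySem

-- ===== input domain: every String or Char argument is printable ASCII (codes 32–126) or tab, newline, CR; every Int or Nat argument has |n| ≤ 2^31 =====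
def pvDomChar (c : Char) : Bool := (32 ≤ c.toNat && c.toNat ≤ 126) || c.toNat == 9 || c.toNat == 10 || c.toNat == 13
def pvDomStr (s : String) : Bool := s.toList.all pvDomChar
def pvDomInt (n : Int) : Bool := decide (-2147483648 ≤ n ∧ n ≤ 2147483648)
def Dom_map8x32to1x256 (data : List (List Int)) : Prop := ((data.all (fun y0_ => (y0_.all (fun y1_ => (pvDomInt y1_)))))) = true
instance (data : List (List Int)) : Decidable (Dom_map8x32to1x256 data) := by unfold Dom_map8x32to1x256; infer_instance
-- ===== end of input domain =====

-- B computes each output position directly by a closed-form index map (divmod arithmetic)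
-- in one flat pass, instead of A's nested serpentine column/row loops (alternative).

-- ===== PORT A =====
def map8x32to1x256 (data : List (List Int)) : List Int :=
  (PySem.List.pyRange (((PySem.List.pyGetD data 0 []).length : Int) - 1) (-1) (-1)).foldl
    (fun output j =>
      let rg := if PySem.Int.mod j 2 = 0
        then PySem.List.pyRange 0 (data.length : Int) 1
        else PySem.List.pyRange ((data.length : Int) - 1) (-1) (-1)
      rg.foldl (fun output i =>
        output ++ [PySem.List.pyGetD (PySem.List.pyGetD data i []) j 0]) output)
    []

-- ===== PORT B =====
def map8x32to1x256_alt (data : List (List Int)) : List Int :=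
  let n : Int := (data.length : Int)
  let m : Int := ((PySem.List.pyGetD data 0 []).length : Int)
  (PySem.List.pyRange 0 (n * m) 1).map (fun k =>
    let q := PySem.Int.floordiv k n
    let r := PySem.Int.mod k n
    let j := m - 1 - q
    let i := if PySem.Int.mod j 2 = 0 then r else n - 1 - r
    PySem.List.pyGetD (PySem.List.pyGetD data i []) j 0)

-- ===== PRECONDITION & SPEC =====
-- Pre_ excludes exactly the inputs where Python A raises IndexError: empty data (data[0])
-- and matrices with a row shorter than row 0 (data[i][j]).
def Pre_map8x32to1x256 (data : List (List Int)) : Prop :=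
  data ≠ [] ∧ ∀ r ∈ data, (data.headD []).length ≤ r.length
instance (data : List (List Int)) : Decidable (Pre_map8x32to1x256 data) := by
  unfold Pre_map8x32to1x256; infer_instance
def pvWitness_map8x32to1x256 : List (List Int) := [[1, 2], [3, 4], [5, 6]]

def Spec_map8x32to1x256 (data : List (List Int)) (out : List Int) : Prop := out = map8x32to1x256_alt data
instance (data : List (List Int)) (out : List Int) : Decidable (Spec_map8x32to1x256 data out) := by unfold Spec_map8x32to1x256; infer_instance

-- ===== CLAIM (what is proved, stated in full; the proofs are below) =====
def Claim_equal_map8x32to1x256 : Prop := ∀ (data : List (List Int)), Dom_map8x32to1x256 data → Pre_map8x32to1x256 data → Spec_map8x32to1x256 data (map8x32to1x256 data)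

-- ===== LEMMAS AND PROOFS =====

-- proof-only helpers: one serpentine column block, and B's index map as a named function
def pvCol (data : List (List Int)) (j : Int) : List Int :=
  data.map (fun row => PySem.List.pyGetD row j 0)

def pvBlock (data : List (List Int)) (j : Int) : List Int :=
  if PySem.Int.mod j 2 = 0 then pvCol data j else (pvCol data j).reverse

def pvSrc (data : List (List Int)) (k : Int) : Int :=
  let n : Int := (data.length : Int)
  let m : Int := ((PySem.List.pyGetD data 0 []).length : Int)
  let q := PySem.Int.floordiv k n
  let r := PySem.Int.mod k n
  let j := m - 1 - q
  let i := if PySem.Int.mod j 2 = 0 then r else n - 1 - r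
  PySem.List.pyGetD (PySem.List.pyGetD data i []) j 0

theorem pv_alt_eq_map (data : List (List Int)) :
    map8x32to1x256_alt data =
      (PySem.List.pyRange 0 ((data.length : Int) * ((PySem.List.pyGetD data 0 []).length : Int)) 1).map
        (pvSrc data) := rfl

-- A equals the flatMap of serpentine column blocks, j descending
theorem pv_A_eq_flatMap (data : List (List Int)) :
    map8x32to1x256 data =
      (PySem.List.pyRange (((PySem.List.pyGetD data 0 []).length : Int) - 1) (-1) (-1)).flatMap
        (pvBlock data) := by
  unfold map8x32to1x256
  trans ((PySem.List.pyRange (((PySem.List.pyGetD data 0 []).length : Int) - 1) (-1) (-1)).foldl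
      (fun acc j => acc ++ pvBlock data j) [])
  · apply PySem.List.foldl_congr_mem
    intro acc j _
    by_cases hmod : PySem.Int.mod j 2 = 0
    · simp only [hmod, if_true]
      rw [PySem.List.foldl_pyRange_zero_pyGetD' data []
          (fun o r => o ++ [PySem.List.pyGetD r j 0]) acc]
      rw [PySem.List.foldl_append_singleton_eq_map]
      simp only [pvBlock, pvCol, hmod, if_true]
    · simp only [hmod, if_false]
      have hrev : PySem.List.pyRange ((data.length : Int) - 1) (-1) (-1) =
          (PySem.List.pyRange 0 (data.length : Int) 1).reverse := by
        rw [PySem.List.pyRange_neg_one_eq_reverse]; norm_num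
      rw [hrev]
      rw [PySem.List.foldl_append_singleton_eq_map
          (fun i => PySem.List.pyGetD (PySem.List.pyGetD data i []) j 0) _ acc]
      rw [List.map_reverse]
      simp only [pvBlock, hmod, if_false, pvCol]
      congr 1
      rw [show (fun i => PySem.List.pyGetD (PySem.List.pyGetD data i []) j 0) =
          (fun r => PySem.List.pyGetD r j 0) ∘ (fun i => PySem.List.pyGetD data i []) from rfl,
        ← List.map_map]
      rw [PySem.List.map_pyGetD_pyRange_zero' data []]
  · rw [PySem.List.foldl_append_eq_flatMap]
    simp

-- map over a shifted unit range
theorem pv_map_pyRange_shift (a : Int) (N : Nat) (f : Int → Int) :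
    (PySem.List.pyRange a (a + (N : Int)) 1).map f =
      (PySem.List.pyRange 0 (N : Int) 1).map (fun t => f (a + t)) := by
  rw [PySem.List.pyRange_one, PySem.List.pyRange_one]
  simp [List.map_map, Function.comp]

-- evaluate B's index map on position c*n + r (row r of chunk c)
theorem pv_src_eval (data : List (List Int)) (hne : data ≠ []) (c : Nat) (r : Int)
    (hr0 : 0 ≤ r) (hr1 : r < (data.length : Int)) :
    pvSrc data ((c : Int) * (data.length : Int) + r) =
      (if PySem.Int.mod (((PySem.List.pyGetD data 0 []).length : Int) - 1 - c) 2 = 0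
       then PySem.List.pyGetD (PySem.List.pyGetD data r [])
              (((PySem.List.pyGetD data 0 []).length : Int) - 1 - c) 0
       else PySem.List.pyGetD (PySem.List.pyGetD data ((data.length : Int) - 1 - r) [])
              (((PySem.List.pyGetD data 0 []).length : Int) - 1 - c) 0) := by
  have hn : (0 : Int) < (data.length : Int) := by
    simpa using List.length_pos_iff.mpr hne
  have hq : PySem.Int.floordiv ((c : Int) * (data.length : Int) + r) (data.length : Int) = c := by
    rw [PySem.Int.floordiv_eq_iff_of_pos hn]
    constructor
    · linarith
    · nlinarith
  have hr : PySem.Int.mod ((c : Int) * (data.length : Int) + r) (data.length : Int) = r := by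
    have h := PySem.Int.floordiv_mul_add_mod ((c : Int) * (data.length : Int) + r)
      (data.length : Int)
    rw [hq] at h
    linarith
  simp only [pvSrc, hq, hr]
  split_ifs <;> rfl

-- one chunk of B is one serpentine block
theorem pv_chunk (data : List (List Int)) (hne : data ≠ []) (c : Nat) :
    (PySem.List.pyRange ((c : Int) * (data.length : Int))
        (((c : Int) + 1) * (data.length : Int)) 1).map (pvSrc data) =
      pvBlock data (((PySem.List.pyGetD data 0 []).length : Int) - 1 - c) := by
  rw [show ((c : Int) + 1) * (data.length : Int) =
      (c : Int) * (data.length : Int) + (data.length : Int) by ring]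
  rw [pv_map_pyRange_shift]
  have hcong : (PySem.List.pyRange 0 ((data.length : Int)) 1).map
      (fun t => pvSrc data ((c : Int) * (data.length : Int) + t)) =
      (PySem.List.pyRange 0 ((data.length : Int)) 1).map (fun t =>
        if PySem.Int.mod (((PySem.List.pyGetD data 0 []).length : Int) - 1 - c) 2 = 0
        then PySem.List.pyGetD (PySem.List.pyGetD data t [])
          (((PySem.List.pyGetD data 0 []).length : Int) - 1 - c) 0
        else PySem.List.pyGetD (PySem.List.pyGetD data ((data.length : Int) - 1 - t) [])
          (((PySem.List.pyGetD data 0 []).length : Int) - 1 - c) 0) :=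
    List.map_congr_left (fun t ht => by
      rw [PySem.List.mem_pyRange_one] at ht
      exact pv_src_eval data hne c t ht.1 ht.2)
  rw [hcong]
  unfold pvBlock
  by_cases hp : PySem.Int.mod (((PySem.List.pyGetD data 0 []).length : Int) - 1 - c) 2 = 0
  · simp only [hp, if_true]
    rw [show (fun t => PySem.List.pyGetD (PySem.List.pyGetD data t [])
        (((PySem.List.pyGetD data 0 []).length : Int) - 1 - c) 0) =
        (fun row => PySem.List.pyGetD row
          (((PySem.List.pyGetD data 0 []).length : Int) - 1 - c) 0) ∘
        (fun t => PySem.List.pyGetD data t []) from rfl, ← List.map_map]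
    rw [PySem.List.map_pyGetD_pyRange_zero' data []]
    rfl
  · simp only [hp, if_false]
    have hcong2 : (PySem.List.pyRange 0 ((data.length : Int)) 1).map (fun t =>
        PySem.List.pyGetD (PySem.List.pyGetD data ((data.length : Int) - 1 - t) [])
          (((PySem.List.pyGetD data 0 []).length : Int) - 1 - c) 0) =
        (PySem.List.pyRange 0 ((data.length : Int)) 1).map (fun t =>
        PySem.List.pyGetD (PySem.List.pyGetD data.reverse t [])
          (((PySem.List.pyGetD data 0 []).length : Int) - 1 - c) 0) :=
      List.map_congr_left (fun t ht => by
        rw [PySem.List.mem_pyRange_one] at ht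
        obtain ⟨ht0, ht1⟩ := ht
        congr 1
        rw [PySem.List.pyGetD_eq_getElem _ _ (by omega) (by omega),
          PySem.List.pyGetD_eq_getElem _ _ ht0 (by simpa using ht1)]
        rw [List.getElem_reverse]
        congr 1
        omega)
    rw [hcong2]
    rw [show (fun t => PySem.List.pyGetD (PySem.List.pyGetD data.reverse t [])
        (((PySem.List.pyGetD data 0 []).length : Int) - 1 - c) 0) =
        (fun row => PySem.List.pyGetD row
          (((PySem.List.pyGetD data 0 []).length : Int) - 1 - c) 0) ∘
        (fun t => PySem.List.pyGetD data.reverse t []) from rfl, ← List.map_map]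
    rw [show ((data.length : Int)) = ((data.reverse.length : Int)) by simp]
    rw [PySem.List.map_pyGetD_pyRange_zero' data.reverse []]
    rw [List.map_reverse]
    rfl

-- the induction: chunks from column c up equal the descending flatMap from j = m-1-c
theorem pv_main (data : List (List Int)) (hne : data ≠ []) :
    ∀ (t c : Nat), c + t = (PySem.List.pyGetD data 0 []).length →
    (PySem.List.pyRange ((c : Int) * (data.length : Int))
        (((PySem.List.pyGetD data 0 []).length : Int) * (data.length : Int)) 1).map (pvSrc data) =
      (PySem.List.pyRange (((PySem.List.pyGetD data 0 []).length : Int) - 1 - c) (-1) (-1)).flatMap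
        (pvBlock data) := by
  have hn : (0 : Int) < (data.length : Int) := by
    simpa using List.length_pos_iff.mpr hne
  intro t
  induction t with
  | zero =>
    intro c hc
    have hc0 : c = (PySem.List.pyGetD data 0 []).length := by omega
    subst hc0
    rw [PySem.List.pyRange_one_eq_nil le_rfl]
    rw [PySem.List.pyRange_neg_one_eq_nil (by omega)]
    rfl
  | succ t ih =>
    intro c hc
    have hcm : c < (PySem.List.pyGetD data 0 []).length := by omega
    rw [PySem.List.pyRange_one_append ((c : Int) * (data.length : Int))
        (((c : Int) + 1) * (data.length : Int))
        (((PySem.List.pyGetD data 0 []).length : Int) * (data.length : Int))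
        (by nlinarith) (by nlinarith [show ((c : Int) + 1) ≤ ((PySem.List.pyGetD data 0 []).length : Int) by exact_mod_cast hcm])]
    rw [List.map_append, pv_chunk data hne c]
    rw [show ((c : Int) + 1) * (data.length : Int) = (((c + 1 : Nat) : Int)) * (data.length : Int)
      by push_cast; ring]
    rw [ih (c + 1) (by omega)]
    rw [PySem.List.pyRange_neg_one_cons
      (show (-1 : Int) < ((PySem.List.pyGetD data 0 []).length : Int) - 1 - c by omega)]
    rw [List.flatMap_cons]
    congr 2
    push_cast
    ring_nf

-- ===== VERDICT (by name: the statement is the Claim_ definition above) =====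
theorem map8x32to1x256_spec : Claim_equal_map8x32to1x256 := by
  intro data _ hpre
  obtain ⟨hne, _⟩ := hpre
  unfold Spec_map8x32to1x256
  rw [pv_alt_eq_map, pv_A_eq_flatMap]
  have h := pv_main data hne (PySem.List.pyGetD data 0 []).length 0 (by omega)
  simpa [mul_comm] using h.symm
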